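-- pv_equiv track=rewrite | github.com/chin8628/Pre-Pro-IT-Lardkrabang-2558 | Prepro-Onsite/DaY_Z_ImageEditor.py | ishflip
-- ===== SOURCE A (Python) =====
-- def ishflip(firstinput, secondinput, inputn):
--     """ is_hflip """
--     firstcheck, secondcheck = list(), list()
--     for i in range(inputn):
--         for j in range(inputn):
--             firstcheck.append(firstinput[i][j])
--     for i in range(inputn - 1, -1, -1):
--         for j in range(inputn):
--             secondcheck.append(secondinput[i][j])
--     return firstcheck == secondcheck
-- ===== SOURCE B (Python) =====
-- def ishflip(firstinput, secondinput, inputn):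
--     """ is_hflip """
--     for i in range(inputn):
--         for j in range(inputn):
--             if firstinput[i][j] != secondinput[inputn - 1 - i][j]:
--                 return False
--     return True
-- ===== Notes on version B (the rewrite author's own statement) =====
-- stated objective: simpler
-- what changed: B drops A's build-two-flat-lists-then-compare pass and instead compares entries in place, row i of the first grid against row n-1-i of the second, returning False at the first mismatch.
import Mathlib
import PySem

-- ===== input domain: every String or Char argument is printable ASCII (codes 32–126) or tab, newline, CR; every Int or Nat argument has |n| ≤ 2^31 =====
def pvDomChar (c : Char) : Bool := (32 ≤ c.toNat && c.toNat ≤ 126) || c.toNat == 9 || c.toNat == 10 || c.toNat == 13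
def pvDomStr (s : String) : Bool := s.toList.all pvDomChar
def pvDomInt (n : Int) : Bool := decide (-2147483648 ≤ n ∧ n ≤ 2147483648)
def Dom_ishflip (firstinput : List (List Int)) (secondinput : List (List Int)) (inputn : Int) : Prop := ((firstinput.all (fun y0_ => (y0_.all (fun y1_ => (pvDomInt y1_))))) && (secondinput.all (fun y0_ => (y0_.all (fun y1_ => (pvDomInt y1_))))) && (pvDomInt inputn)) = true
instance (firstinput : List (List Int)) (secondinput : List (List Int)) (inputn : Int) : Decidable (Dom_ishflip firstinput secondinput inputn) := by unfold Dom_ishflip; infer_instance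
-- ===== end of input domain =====

-- B replaces A's build-two-flat-lists-then-compare with a direct in-place, short-circuiting
-- entrywise comparison of row i against flipped row n-1-i (objective: simpler).

-- ===== PORT A =====
-- shared helper: m[i][j] (exact on Pre_, which puts both indices in range)
def pvAt (m : List (List Int)) (i j : Int) : Int :=
  PySem.List.pyGetD (PySem.List.pyGetD m i []) j 0

def ishflip (firstinput : List (List Int)) (secondinput : List (List Int)) (inputn : Int) : Bool :=
  let firstcheck := (PySem.List.pyRange 0 inputn 1).foldl (fun acc i =>
    (PySem.List.pyRange 0 inputn 1).foldl (fun acc2 j => acc2 ++ [pvAt firstinput i j]) acc) []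
  let secondcheck := (PySem.List.pyRange (inputn - 1) (-1) (-1)).foldl (fun acc i =>
    (PySem.List.pyRange 0 inputn 1).foldl (fun acc2 j => acc2 ++ [pvAt secondinput i j]) acc) []
  firstcheck == secondcheck

-- ===== PORT B =====
def ishflip_alt (firstinput : List (List Int)) (secondinput : List (List Int)) (inputn : Int) : Bool :=
  (PySem.List.pyRange 0 inputn 1).all (fun i =>
    (PySem.List.pyRange 0 inputn 1).all (fun j =>
      pvAt firstinput i j == pvAt secondinput (inputn - 1 - i) j))

-- ===== PRECONDITION & SPEC =====
-- Pre_: exactly the inputs where Python A returns (every index it touches exists);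
-- outside it A raises IndexError.
def Pre_ishflip (firstinput : List (List Int)) (secondinput : List (List Int)) (inputn : Int) : Prop :=
  inputn ≤ (firstinput.length : Int) ∧ inputn ≤ (secondinput.length : Int) ∧
  (∀ row ∈ firstinput.take inputn.toNat, inputn ≤ (row.length : Int)) ∧
  (∀ row ∈ secondinput.take inputn.toNat, inputn ≤ (row.length : Int))
instance (firstinput : List (List Int)) (secondinput : List (List Int)) (inputn : Int) : Decidable (Pre_ishflip firstinput secondinput inputn) := by unfold Pre_ishflip; infer_instance

def pvWitness_ishflip : List (List Int) × List (List Int) × Int := ([[1, 2], [3, 4]], [[3, 4], [1, 2]], 2)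

def Spec_ishflip (firstinput : List (List Int)) (secondinput : List (List Int)) (inputn : Int) (out : Bool) : Prop := out = ishflip_alt firstinput secondinput inputn
instance (firstinput : List (List Int)) (secondinput : List (List Int)) (inputn : Int) (out : Bool) : Decidable (Spec_ishflip firstinput secondinput inputn out) := by unfold Spec_ishflip; infer_instance

-- ===== CLAIM (what is proved, stated in full; the proofs are below) =====
def Claim_equal_ishflip : Prop := ∀ (firstinput : List (List Int)) (secondinput : List (List Int)) (inputn : Int), Dom_ishflip firstinput secondinput inputn → Pre_ishflip firstinput secondinput inputn → Spec_ishflip firstinput secondinput inputn (ishflip firstinput secondinput inputn)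

-- ===== LEMMAS AND PROOFS =====

-- A's outer append-loop is a flatMap
theorem pv_foldl_append_flatMap {α β : Type} (L : List α) (g : α → List β) :
    ∀ acc, L.foldl (fun a x => a ++ g x) acc = acc ++ L.flatMap g := by
  induction L with
  | nil => simp
  | cons a L ih => intro acc; simp [List.foldl_cons, ih]

-- concatenations of blocks of matching lengths are equal iff the blocks are
theorem pv_flatMap_eq_iff {α β : Type} (L : List α) (f g : α → List β)
    (h : ∀ x ∈ L, (f x).length = (g x).length) :
    L.flatMap f = L.flatMap g ↔ ∀ x ∈ L, f x = g x := by
  induction L with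
  | nil => simp
  | cons a L ih =>
    simp only [List.flatMap_cons, List.mem_cons, forall_eq_or_imp]
    constructor
    · intro he
      obtain ⟨h1, h2⟩ := List.append_inj he (h a (by simp))
      exact ⟨h1, (ih (fun x hx => h x (by simp [hx]))).mp h2⟩
    · rintro ⟨h1, h2⟩
      rw [h1, (ih (fun x hx => h x (by simp [hx]))).mpr h2]

theorem ishflip_eq (firstinput secondinput : List (List Int)) (inputn : Int) :
    ishflip firstinput secondinput inputn = ishflip_alt firstinput secondinput inputn := by
  have hneg : inputn - 1 - -1 = inputn := by ring
  rw [ishflip, ishflip_alt]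
  simp only [PySem.List.foldl_append_singleton_eq_map, pv_foldl_append_flatMap, List.nil_append,
    PySem.List.pyRange_one, PySem.List.pyRange_neg_one, hneg, Int.sub_zero,
    List.flatMap_map, List.all_map, Function.comp_def]
  rw [Bool.eq_iff_iff]
  simp only [beq_iff_eq, List.all_eq_true, beq_iff_eq]
  rw [pv_flatMap_eq_iff _ _ _ (by intro x _; simp)]
  constructor
  · intro h t ht j hj
    have := h t ht
    rw [List.map_inj_left] at this
    have := this (0 + (j : Int)) (by exact List.mem_map_of_mem hj)
    simpa using this
  · intro h t ht
    rw [List.map_inj_left]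
    intro i hi
    obtain ⟨j, hj, rfl⟩ := List.mem_map.mp hi
    simpa using h t ht j hj

-- ===== VERDICT (by name: the statement is the Claim_ definition above) =====
theorem ishflip_spec : Claim_equal_ishflip := by
  intro f s n _ _
  exact ishflip_eq f s n
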